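-- pv_equiv track=rewrite | github.com/familayA/project-in-python | project/customers.py | calculate_payment
-- ===== SOURCE A (Python) =====
-- def calculate_payment(team_members):
--     payment = 0
--     for i, member in enumerate(team_members, 1):
--         if i % 8 == 0:
--             payment += 200
--         elif i > (len(team_members) // 8) * 8:
--             payment += 50
--     return payment
-- ===== SOURCE B (Python) =====
-- def calculate_payment(team_members):
--     n = len(team_members)
--     return (n // 8) * 200 + (n % 8) * 50
-- ===== Notes on version B (the rewrite author's own statement) =====
-- stated objective: faster
-- what changed: Replaced the O(n) enumerate loop with the closed form (n//8)*200 + (n%8)*50 on the list length.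
import Mathlib
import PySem

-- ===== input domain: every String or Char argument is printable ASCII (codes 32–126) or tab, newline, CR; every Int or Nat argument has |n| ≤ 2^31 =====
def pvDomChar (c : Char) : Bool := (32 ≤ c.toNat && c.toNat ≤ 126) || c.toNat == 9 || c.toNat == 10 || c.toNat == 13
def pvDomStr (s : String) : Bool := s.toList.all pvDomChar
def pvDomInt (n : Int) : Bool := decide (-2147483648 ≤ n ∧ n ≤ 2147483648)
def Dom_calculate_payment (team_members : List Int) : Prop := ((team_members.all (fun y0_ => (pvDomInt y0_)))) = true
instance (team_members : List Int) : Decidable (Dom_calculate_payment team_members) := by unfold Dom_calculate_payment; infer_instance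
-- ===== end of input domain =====

-- ===== PORT A =====
-- A: loop over enumerate(team_members, 1) accumulating payment; ported as structural recursion
-- carrying the index i and accumulator, with n = len(team_members) (constant through the loop).
def calcGoA (n : Int) : List Int → Int → Int → Int
  | [], _, payment => payment
  | _ :: rest, i, payment =>
    calcGoA n rest (i + 1)
      (if PySem.Int.mod i 8 = 0 then payment + 200
       else if i > PySem.Int.floordiv n 8 * 8 then payment + 50
       else payment)

def calculate_payment (team_members : List Int) : Int :=
  calcGoA (team_members.length : Int) team_members 1 0

-- ===== PORT B =====
-- B: closed form on the length.
def calculate_payment_alt (team_members : List Int) : Int :=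
  let n : Int := (team_members.length : Int)
  PySem.Int.floordiv n 8 * 200 + PySem.Int.mod n 8 * 50

-- ===== PRECONDITION & SPEC =====
def Spec_calculate_payment (team_members : List Int) (out : Int) : Prop := out = calculate_payment_alt team_members
instance (team_members : List Int) (out : Int) : Decidable (Spec_calculate_payment team_members out) := by unfold Spec_calculate_payment; infer_instance

-- ===== CLAIM (what is proved, stated in full; the proofs are below) =====
def Claim_equal_calculate_payment : Prop := ∀ (team_members : List Int), Dom_calculate_payment team_members → Spec_calculate_payment team_members (calculate_payment team_members)

-- ===== LEMMAS AND PROOFS =====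

-- prefix contribution of indices 1..i-1 (closed form), relative to total length n
def prefixPay (n i : Int) : Int :=
  200 * ((i - 1) / 8) + (if i - 1 > 8 * (n / 8) then 50 * (i - 1 - 8 * (n / 8)) else 0)

theorem calcGoA_closed (rest : List Int) : ∀ (n i p : Int), 1 ≤ i →
    i + (rest.length : Int) = n + 1 →
    calcGoA n rest i p = p + (200 * (n / 8) + 50 * (n % 8)) - prefixPay n i := by
  induction rest with
  | nil =>
    intro n i p hi hlen
    simp only [List.length_nil, Int.natCast_zero, add_zero] at hlen
    simp only [calcGoA, prefixPay]
    subst hlen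
    split_ifs <;> omega
  | cons x rest ih =>
    intro n i p hi hlen
    simp only [List.length_cons] at hlen
    have hin : i ≤ n := by push_cast at hlen; omega
    simp only [calcGoA, PySem.Int.mod_eq_emod_of_pos (a := i) (b := 8) (by omega),
      PySem.Int.floordiv_eq_ediv_of_pos (a := n) (b := 8) (by omega)]
    rw [ih n (i + 1) _ (by omega) (by push_cast at hlen ⊢; omega)]
    simp only [prefixPay]
    have h8 : 8 * (n / 8) ≤ n := by omega
    split_ifs <;> omega

theorem alt_closed (team_members : List Int) :
    calculate_payment_alt team_members =
      200 * ((team_members.length : Int) / 8) + 50 * ((team_members.length : Int) % 8) := by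
  simp only [calculate_payment_alt,
    PySem.Int.mod_eq_emod_of_pos (a := (team_members.length : Int)) (b := 8) (by omega),
    PySem.Int.floordiv_eq_ediv_of_pos (a := (team_members.length : Int)) (b := 8) (by omega)]
  ring

-- ===== VERDICT (by name: the statement is the Claim_ definition above) =====
theorem calculate_payment_spec : Claim_equal_calculate_payment := by
  intro team_members _
  unfold Spec_calculate_payment calculate_payment
  rw [calcGoA_closed team_members (team_members.length : Int) 1 0 (by omega) (by omega),
    alt_closed]
  have h0 : (0 : Int) ≤ (team_members.length : Int) := by positivity
  simp only [prefixPay]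
  split_ifs <;> omega
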